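-- pv_equiv track=rewrite | github.com/inkawhich/ood-sar-atr | helpers.py | get_class_mapping_from_dataset_list
-- ===== SOURCE A (Python) =====
-- def get_class_mapping_from_dataset_list(dset_list):
-- 	class_map = {}
-- 	for i in dset_list:
-- 		class_name = i[0].split("/")[-2]
-- 		class_number = i[1]
-- 		if class_number in class_map.keys():
-- 			assert(class_map[class_number] == class_name)
-- 		else:
-- 			class_map[class_number] = class_name
-- 	return class_map
-- ===== SOURCE B (Python) =====
-- def get_class_mapping_from_dataset_list(dset_list):
--     # Pass 1: group every class_name seen under its class_number.
--     groups = {}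
--     for path, num in dset_list:
--         groups.setdefault(num, []).append(path.split("/")[-2])
--     # Pass 2: each number must map to exactly one distinct name.
--     class_map = {}
--     for num, names in groups.items():
--         assert len(set(names)) == 1
--         class_map[num] = names[0]
--     return class_map
-- ===== Notes on version B (the rewrite author's own statement) =====
-- stated objective: alternative
-- what changed: Replaces the single interleaved check-and-insert loop by a two-pass group-then-validate decomposition: first group all names per class number, then assert each group is a singleton set and emit number->first name.
import Mathlib
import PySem

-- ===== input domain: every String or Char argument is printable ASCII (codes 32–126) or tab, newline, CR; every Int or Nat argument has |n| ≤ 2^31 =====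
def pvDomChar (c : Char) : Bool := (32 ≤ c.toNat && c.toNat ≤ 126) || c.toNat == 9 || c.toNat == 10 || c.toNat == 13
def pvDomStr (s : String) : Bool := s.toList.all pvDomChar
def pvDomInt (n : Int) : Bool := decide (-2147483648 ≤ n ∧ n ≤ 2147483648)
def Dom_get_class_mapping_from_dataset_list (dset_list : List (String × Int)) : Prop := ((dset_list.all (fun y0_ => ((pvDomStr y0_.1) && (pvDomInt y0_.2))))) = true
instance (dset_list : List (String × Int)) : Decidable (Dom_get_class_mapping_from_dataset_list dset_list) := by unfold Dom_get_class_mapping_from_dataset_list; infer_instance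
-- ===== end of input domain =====

-- B replaces A's interleaved check-and-insert loop by a two-pass decomposition (group all
-- names per class number, then validate each group and emit the map); same cost, no speed claim.

-- shared helper: i[0].split("/")[-2] (both Pythons compute exactly this expression;
-- pyGetD is exact under Pre_, which guarantees the split has at least 2 parts)
def pvClassName (p : String) : String :=
  PySem.List.pyGetD ((PySem.Str.split? p "/").getD []) (-2) ""

-- ===== PORT A =====
def get_class_mapping_from_dataset_list (dset_list : List (String × Int)) : List (Int × String) :=
  (dset_list.foldl (fun (class_map : PySem.Dict Int String) i =>
      -- Python: if class_number in class_map.keys(): assert(...)  (assert holds under Pre_)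
      if class_map.contains i.2 then class_map
      else class_map.insert i.2 (pvClassName i.1))
    PySem.Dict.empty).items

-- ===== PORT B =====
def get_class_mapping_from_dataset_list_alt (dset_list : List (String × Int)) : List (Int × String) :=
  -- pass 1: group every class_name under its class_number (setdefault(num, []).append(name))
  let groups : PySem.Dict Int (List String) :=
    dset_list.foldl (fun g i => g.modify i.2 [] (fun names => names ++ [pvClassName i.1]))
      PySem.Dict.empty
  -- pass 2: assert len(set(names)) == 1 holds under Pre_; emit num -> names[0]
  (groups.items.foldl (fun (class_map : PySem.Dict Int String) p =>
      class_map.insert p.1 (p.2.headD "")) PySem.Dict.empty).items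

-- ===== PRECONDITION & SPEC =====
-- Pre_ excludes exactly the inputs on which Python A raises: an IndexError when some path has
-- fewer than two '/'-separated parts, and an AssertionError when two entries give the same
-- class number but different class names.
def Pre_get_class_mapping_from_dataset_list (dset_list : List (String × Int)) : Prop :=
  (∀ p ∈ dset_list, 2 ≤ ((PySem.Str.split? p.1 "/").getD []).length) ∧
  List.Pairwise (fun a b => a.2 = b.2 → pvClassName a.1 = pvClassName b.1) dset_list
instance (dset_list : List (String × Int)) : Decidable (Pre_get_class_mapping_from_dataset_list dset_list) := by
  unfold Pre_get_class_mapping_from_dataset_list; infer_instance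

def pvWitness_get_class_mapping_from_dataset_list : (List (String × Int)) :=
  [("data/cat/img0", 0), ("data2/cat/img1", 0), ("data/dog/img2", 1)]

def Spec_get_class_mapping_from_dataset_list (dset_list : List (String × Int)) (out : List (Int × String)) : Prop := out = get_class_mapping_from_dataset_list_alt dset_list
instance (dset_list : List (String × Int)) (out : List (Int × String)) : Decidable (Spec_get_class_mapping_from_dataset_list dset_list out) := by unfold Spec_get_class_mapping_from_dataset_list; infer_instance

-- ===== CLAIM (what is proved, stated in full; the proofs are below) =====
def Claim_equal_get_class_mapping_from_dataset_list : Prop := ∀ (dset_list : List (String × Int)), Dom_get_class_mapping_from_dataset_list dset_list → Pre_get_class_mapping_from_dataset_list dset_list → Spec_get_class_mapping_from_dataset_list dset_list (get_class_mapping_from_dataset_list dset_list)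

-- ===== LEMMAS AND PROOFS =====

-- the "first name per number" projection relating B's grouped dict to A's dict
def pvF : Int × List String → Int × String := fun p => (p.1, p.2.headD "")

-- loop invariant: if A's dict is the pvF-image of B's grouping dict (whose keys are Nodup and
-- whose value lists are nonempty), that relation is preserved by the two loops in lockstep.
theorem pv_inv (l : List (String × Int)) (m : PySem.Dict Int String)
    (g : PySem.Dict Int (List String))
    (h : m.items = g.items.map pvF) (hnd : g.keys.Nodup)
    (hne : ∀ p ∈ g.items, p.2 ≠ []) :
    (l.foldl (fun (class_map : PySem.Dict Int String) i =>
        if class_map.contains i.2 then class_map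
        else class_map.insert i.2 (pvClassName i.1)) m).items
      = ((l.foldl (fun g i => g.modify i.2 [] (fun names => names ++ [pvClassName i.1])) g).items).map pvF := by
  induction l generalizing m g with
  | nil => simpa using h
  | cons i l ih =>
    have hkeys : m.keys = g.keys := by
      simp [PySem.Dict.keys, h, pvF, List.map_map, Function.comp]
    have hc : m.contains i.2 = g.contains i.2 := by
      rw [PySem.Dict.contains_eq_decide_mem_keys, PySem.Dict.contains_eq_decide_mem_keys, hkeys]
    simp only [List.foldl_cons]
    by_cases hg : g.contains i.2 = true
    · rw [if_pos (hc.trans hg)]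
      apply ih
      · -- items of the modified group dict project back to m.items
        rw [h, PySem.Dict.modify, PySem.Dict.items_insert_of_contains _ _ hg, List.map_map]
        apply (List.map_congr_left ?_).symm
        intro p hp
        by_cases hpk : (p.1 == i.2) = true
        · have hp1 : p.1 = i.2 := by simpa using hpk
          have hgd : g.getD p.1 [] = p.2 := by
            exact PySem.Dict.getD_of_mem_items g (by simpa using hp) hnd []
          simp only [Function.comp, hpk, if_pos]
          rw [← hp1, hgd]
          have := hne p hp
          cases hval : p.2 with
          | nil => exact absurd hval this
          | cons a t => simp [pvF, hp1, hval]
        · simp [Function.comp, hpk]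
      · rw [PySem.Dict.keys_modify, PySem.Dict.keys_insert_of_contains _ _ hg]; exact hnd
      · intro p hp
        rw [PySem.Dict.modify, PySem.Dict.items_insert_of_contains _ _ hg] at hp
        obtain ⟨q, hq, rfl⟩ := List.mem_map.mp hp
        by_cases hqk : (q.1 == i.2) = true
        · simp [hqk]
        · simpa [hqk] using hne q hq
    · have hg' : g.contains i.2 = false := by simpa using hg
      rw [if_neg (by rw [hc, hg']; simp)]
      apply ih
      · rw [PySem.Dict.items_insert_of_not_contains _ _ (hc.trans hg'),
            PySem.Dict.modify, PySem.Dict.getD_of_not_contains _ _ hg',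
            PySem.Dict.items_insert_of_not_contains _ _ hg', List.map_append, h]
        simp [pvF]
      · rw [PySem.Dict.keys_modify, PySem.Dict.keys_insert_of_not_contains _ _ hg']
        have : i.2 ∉ g.keys := by
          intro hmem
          rw [PySem.Dict.contains_eq_decide_mem_keys] at hg'
          simp [hmem] at hg'
        rw [List.nodup_append]
        refine ⟨hnd, by simp, ?_⟩
        intro a ha b hb hab
        simp at hb
        subst hab; subst hb; exact this ha
      · intro p hp
        rw [PySem.Dict.modify, PySem.Dict.getD_of_not_contains _ _ hg',
            PySem.Dict.items_insert_of_not_contains _ _ hg'] at hp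
        rcases List.mem_append.mp hp with h1 | h1
        · exact hne p h1
        · simp at h1; simp [h1]

-- ===== VERDICT (by name: the statement is the Claim_ definition above) =====
theorem get_class_mapping_from_dataset_list_spec : Claim_equal_get_class_mapping_from_dataset_list := by
  intro dset_list _ _
  unfold Spec_get_class_mapping_from_dataset_list
  unfold get_class_mapping_from_dataset_list get_class_mapping_from_dataset_list_alt
  set G := dset_list.foldl (fun g i => g.modify i.2 [] (fun names => names ++ [pvClassName i.1]))
      (PySem.Dict.empty : PySem.Dict Int (List String)) with hG
  have hA : (dset_list.foldl (fun (class_map : PySem.Dict Int String) i =>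
        if class_map.contains i.2 then class_map
        else class_map.insert i.2 (pvClassName i.1)) PySem.Dict.empty).items
      = G.items.map pvF := by
    apply pv_inv <;> simp [PySem.Dict.empty, PySem.Dict.keys]
  have hnd : G.keys.Nodup := by
    apply PySem.Dict.nodup_keys_foldl_modify_key dset_list (fun i => i.2) []
      (fun _ i names => names ++ [pvClassName i.1])
    simp [PySem.Dict.empty, PySem.Dict.keys]
  have hB : (G.items.foldl (fun (class_map : PySem.Dict Int String) p =>
        class_map.insert p.1 (p.2.headD "")) PySem.Dict.empty).items
      = G.items.map pvF := by
    have := PySem.Dict.items_foldl_insert_fresh G.items (fun p => p.1)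
      (fun p => p.2.headD "") PySem.Dict.empty
      (fun a _ => by simp [PySem.Dict.contains_empty])
      (by simpa [PySem.Dict.keys] using hnd)
    have hmap : G.items.map pvF = G.items.map (fun a => (a.1, a.2.headD "")) :=
      List.map_congr_left (fun p _ => rfl)
    rw [hmap]
    simpa [PySem.Dict.empty] using this
  rw [hA, ← hB]
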